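-- pv_equiv track=rewrite | github.com/eytans/TheSy | experiments/cvc4_newth_alltogether/similar_cases.py | find_similar_test_cases
-- ===== SOURCE A (Python) =====
-- def extract_rewrites(test_case):
--     """
--     Extracts rewrite rules from a given test case.
--
--     Args:
--         test_case (str): Test case string.
--
--     Returns:
--         list: List of extracted rewrite rules.
--     """
--     rewrites = []
--     lines = test_case.split("\n")
--     for line in lines:
--         line = line.strip()
--         if line.startswith("rw"):
--             rewrites.append(line)
--     return rewrites
--
-- def extract_prove_statement(test_case):
--     """
--     Extracts prove statement from a given test case.
--
--     Args:
--         test_case (str): Test case string.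
--
--     Returns:
--         str: Extracted prove statement.
--     """
--     lines = test_case.split("\n")
--     for line in lines:
--         line = line.strip()
--         if line.startswith("prove"):
--             return line
--     return None
--
-- def find_similar_test_cases(test_cases):
--     """
--     Identifies similar test cases based on the intersection of their extracted rewrite rules.
--
--     Args:
--         test_cases (list): List of test case strings.
--
--     Returns:
--         list: List of tuples, where the first element is the test case itself, and the second element is a list of
--         prove statements from other similar test cases.
--     """
--     test_rewrites = {}
--     prove_statements = {}
--     similar_test_cases = []
--
--     # Extract rewrite rules and prove statements for each test case
--     for i, test_case in enumerate(test_cases):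
--         test_rewrites[i] = set(" ".join(rw.split()[2:]) for rw in extract_rewrites(test_case))
--         prove_statements[i] = extract_prove_statement(test_case)
--
--     # Find similar test cases
--     for i, test_case in enumerate(test_cases):
--         similar_prove_statements = []
--         for j, other_test_case in enumerate(test_cases):
--             if i != j:
--                 intersection = test_rewrites[i].intersection(test_rewrites[j])
--                 if len(intersection) >= 2:
--                     similar_prove_statements.append(prove_statements[j])
--         similar_test_cases.append((test_case, similar_prove_statements))
--
--     return similar_test_cases
-- ===== SOURCE B (Python) =====
-- def find_similar_test_cases(test_cases):
--     # One pass per test case to collect rule keys and the prove statement,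
--     # then an inverted index rule -> case indices with co-occurrence counting
--     # instead of the quadratic pairwise set intersections.
--     rule_sets = []
--     proves = []
--     for tc in test_cases:
--         rules = set()
--         prove = None
--         for line in tc.split("\n"):
--             line = line.strip()
--             if line.startswith("rw"):
--                 rules.add(" ".join(line.split()[2:]))
--             elif line.startswith("prove") and prove is None:
--                 prove = line
--         rule_sets.append(rules)
--         proves.append(prove)
--
--     index = {}
--     for i, rules in enumerate(rule_sets):
--         for r in rules:
--             index.setdefault(r, []).append(i)
--
--     n = len(test_cases)
--     result = []
--     for i, tc in enumerate(test_cases):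
--         counts = {}
--         for r in rule_sets[i]:
--             for j in index[r]:
--                 counts[j] = counts.get(j, 0) + 1
--         result.append((tc, [proves[j] for j in range(n) if j != i and counts.get(j, 0) >= 2]))
--     return result
-- ===== Notes on version B (the rewrite author's own statement) =====
-- stated objective: faster
-- what changed: Replaces A's O(n^2) pairwise set intersections (after two separate line scans per case) by a single parse pass per case plus an inverted index rule->case indices whose co-occurrence counts give the shared-rule counts directly.
import Mathlib
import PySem

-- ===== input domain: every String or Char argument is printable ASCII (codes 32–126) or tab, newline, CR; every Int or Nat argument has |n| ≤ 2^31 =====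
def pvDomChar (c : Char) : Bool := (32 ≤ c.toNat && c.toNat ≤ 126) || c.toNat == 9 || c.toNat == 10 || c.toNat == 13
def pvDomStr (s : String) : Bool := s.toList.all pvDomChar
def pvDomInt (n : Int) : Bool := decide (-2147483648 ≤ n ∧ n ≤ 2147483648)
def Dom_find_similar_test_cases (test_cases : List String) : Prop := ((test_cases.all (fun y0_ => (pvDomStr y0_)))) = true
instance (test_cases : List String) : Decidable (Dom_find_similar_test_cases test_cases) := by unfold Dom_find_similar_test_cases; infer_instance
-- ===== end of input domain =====

-- B replaces A's quadratic pairwise set intersections by a single parse pass plus an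
-- inverted index rule -> case indices with co-occurrence counting (alternative algorithm).

-- ===== PORT A =====
-- " ".join(line.split()[2:]) — shared text in both Pythons
def pvKey (line : String) : String :=
  PySem.Str.join " " (PySem.List.slice (PySem.Str.split₀ line) (some 2) none)

-- test_case.split("\n"); sep ≠ "" so split? is always some
def pvLines (test_case : String) : List String :=
  (PySem.Str.split? test_case "\n").getD []

def extract_rewrites (test_case : String) : List String :=
  (pvLines test_case).foldl (fun rewrites line =>
    let line := PySem.Str.strip line
    if PySem.Str.startswith line "rw" then rewrites ++ [line] else rewrites) []

-- the early-returning 'for line in lines: … return line' loop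
def eps_go : List String → Option String
  | [] => none
  | line :: rest =>
    let line := PySem.Str.strip line
    if PySem.Str.startswith line "prove" then some line else eps_go rest

def extract_prove_statement (test_case : String) : Option String :=
  eps_go (pvLines test_case)

def find_similar_test_cases (test_cases : List String) : List (String × List (Option String)) :=
  -- first loop: fill both dicts (keys 0..n-1, always present at the reads below)
  let dicts :=
    (PySem.List.enumerate test_cases).foldl
      (fun (d : PySem.Dict Int (PySem.Set String) × PySem.Dict Int (Option String)) p =>
        (d.1.insert p.1 (PySem.Set.ofList ((extract_rewrites p.2).map pvKey)),
         d.2.insert p.1 (extract_prove_statement p.2)))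
      (PySem.Dict.empty, PySem.Dict.empty)
  let test_rewrites := dicts.1
  let prove_statements := dicts.2
  -- second loop: pairwise comparison
  (PySem.List.enumerate test_cases).foldl (fun similar_test_cases p =>
    let similar_prove_statements :=
      (PySem.List.enumerate test_cases).foldl (fun sps q =>
        if p.1 ≠ q.1 then
          let inter := PySem.Set.inter (test_rewrites.getD p.1 PySem.Set.empty)
                                        (test_rewrites.getD q.1 PySem.Set.empty)
          if 2 ≤ PySem.Set.len inter then sps ++ [prove_statements.getD q.1 none] else sps
        else sps) []
    similar_test_cases ++ [(p.2, similar_prove_statements)]) []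

-- ===== PORT B =====
-- one pass over the lines of a test case: (rule-key set, first prove line)
def fstc_parse (tc : String) : PySem.Set String × Option String :=
  (pvLines tc).foldl (fun st line =>
    let line := PySem.Str.strip line
    if PySem.Str.startswith line "rw" then
      (PySem.Set.add st.1 (pvKey line), st.2)
    else if PySem.Str.startswith line "prove" && st.2.isNone then
      (st.1, some line)
    else st) (PySem.Set.empty, none)

def find_similar_test_cases_alt (test_cases : List String) : List (String × List (Option String)) :=
  let parsed :=
    test_cases.foldl (fun (st : List (PySem.Set String) × List (Option String)) tc =>
      (st.1 ++ [(fstc_parse tc).1], st.2 ++ [(fstc_parse tc).2])) ([], [])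
  let rule_sets := parsed.1
  let proves := parsed.2
  -- inverted index: rule -> list of case indices (setdefault(r, []).append(i))
  let index : PySem.Dict String (List Int) :=
    (PySem.List.enumerate rule_sets).foldl (fun d p =>
      p.2.foldl (fun d r => d.modify r [] (· ++ [p.1])) d) PySem.Dict.empty
  let n := PySem.List.len test_cases
  (PySem.List.enumerate test_cases).foldl (fun result p =>
    let counts : PySem.Dict Int Int :=
      (PySem.List.pyGetD rule_sets p.1 PySem.Set.empty).foldl (fun c r =>
        (index.getD r []).foldl (fun c j => c.insert j (c.getD j 0 + 1)) c) PySem.Dict.empty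
    result ++ [(p.2,
      ((PySem.List.pyRange 0 n 1).filter
          (fun j => decide (j ≠ p.1) && decide (2 ≤ counts.getD j 0))).map
        (fun j => PySem.List.pyGetD proves j none))]) []

-- ===== PRECONDITION & SPEC =====
def Spec_find_similar_test_cases (test_cases : List String) (out : List (String × List (Option String))) : Prop := out = find_similar_test_cases_alt test_cases
instance (test_cases : List String) (out : List (String × List (Option String))) : Decidable (Spec_find_similar_test_cases test_cases out) := by unfold Spec_find_similar_test_cases; infer_instance

-- ===== CLAIM (what is proved, stated in full; the proofs are below) =====
def Claim_equal_find_similar_test_cases : Prop := ∀ (test_cases : List String), Dom_find_similar_test_cases test_cases → Spec_find_similar_test_cases test_cases (find_similar_test_cases test_cases)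

-- ===== LEMMAS AND PROOFS =====
-- ---------- proof-side abbreviations ----------
def pvR (tc : String) : PySem.Set String :=
  PySem.Set.ofList ((extract_rewrites tc).map pvKey)

-- ---------- generic list lemmas ----------
theorem pv_foldl_if_add {α β σ : Type} (p : α → Bool) (g : α → β) (f : σ → β → σ) :
    ∀ (l : List α) (s : σ),
      l.foldl (fun s x => if p x = true then f s (g x) else s) s
        = ((l.filter p).map g).foldl f s := by
  intro l
  induction l with
  | nil => intro s; rfl
  | cons x t ih =>
    intro s
    by_cases h : p x = true
    · simp [h, ih]
    · simp only [Bool.not_eq_true] at h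
      simp [h, ih]

theorem pv_foldl_foldl_flatMap {α β σ : Type} (g : α → List β) (step : σ → β → σ) :
    ∀ (l : List α) (d : σ),
      l.foldl (fun d a => (g a).foldl step d) d = (l.flatMap g).foldl step d := by
  intro l
  induction l with
  | nil => intro d; rfl
  | cons x t ih => intro d; simp [List.foldl_append, ih]

-- ---------- enumerate ----------
theorem pv_enum_nil {α : Type} (s : Int) : PySem.List.enumerate ([] : List α) s = [] := rfl

theorem pv_enum_cons {α : Type} (x : α) (xs : List α) (s : Int) :
    PySem.List.enumerate (x :: xs) s = (s, x) :: PySem.List.enumerate xs (s + 1) := rfl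

theorem pv_enum_map_fst {α : Type} :
    ∀ (xs : List α) (s : Int),
      (PySem.List.enumerate xs s).map Prod.fst = PySem.List.pyRange s (s + xs.length) 1 := by
  intro xs
  induction xs with
  | nil => intro s; simp [PySem.List.pyRange_one_eq_nil]
  | cons x t ih =>
    intro s
    rw [pv_enum_cons]
    rw [PySem.List.pyRange_one_cons (by simp only [List.length_cons]; push_cast; omega)]
    simp only [List.map_cons, ih (s + 1), List.length_cons]
    congr 2
    push_cast
    ring

theorem pv_mem_enum {α : Type} [Inhabited α] :
    ∀ (xs : List α) (s : Int) (p : Int × α), p ∈ PySem.List.enumerate xs s →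
      s ≤ p.1 ∧ p.1 < s + xs.length ∧ p.2 = xs.getD (p.1 - s).toNat default := by
  intro xs
  induction xs with
  | nil => intro s p h; simp at h
  | cons x t ih =>
    intro s p h
    rw [pv_enum_cons] at h
    rcases List.mem_cons.1 h with h | h
    · subst h; simp only [List.length_cons]; refine ⟨le_refl _, by push_cast; omega, by simp⟩
    · obtain ⟨h1, h2, h3⟩ := ih (s + 1) p h
      refine ⟨by omega, by simp only [List.length_cons] at h2 ⊢; push_cast at h2 ⊢; omega, ?_⟩
      have : (p.1 - s).toNat = (p.1 - (s + 1)).toNat + 1 := by omega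
      simp [this, h3]

-- ---------- A's dicts ----------
theorem pv_getD_enumInsert {ν : Type} (f : String → ν) (dflt : ν) :
    ∀ (xs : List String) (s : Int) (d : PySem.Dict Int ν) (j : Int),
      ((PySem.List.enumerate xs s).foldl (fun d p => d.insert p.1 (f p.2)) d).getD j dflt
        = if s ≤ j ∧ j < s + xs.length then f (xs.getD (j - s).toNat "") else d.getD j dflt := by
  intro xs
  induction xs with
  | nil => intro s d j; simp only [pv_enum_nil, List.foldl_nil, List.length_nil]; rw [if_neg (by push_cast; omega)]
  | cons x t ih =>
    intro s d j
    rw [pv_enum_cons]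
    simp only [List.foldl_cons]
    rw [ih (s + 1)]
    by_cases hj : s + 1 ≤ j ∧ j < s + 1 + t.length
    · rw [if_pos hj, if_pos (by simp only [List.length_cons]; push_cast at hj ⊢; omega)]
      have : (j - s).toNat = (j - (s + 1)).toNat + 1 := by omega
      simp [this]
    · rw [if_neg hj, PySem.Dict.getD_insert]
      by_cases he : j = s
      · subst he; rw [if_pos rfl, if_pos (by simp only [List.length_cons]; push_cast; omega)]
        simp
      · rw [if_neg he, if_neg (by simp only [List.length_cons] at hj ⊢; push_cast at hj ⊢; omega)]

theorem pv_sw_rw_not_prove (l : String) (h : PySem.Str.startswith l "rw" = true) :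
    PySem.Str.startswith l "prove" = false := by
  simp only [PySem.Str.startswith] at *
  rw [PySem.Chars.startswith_iff] at h
  rcases h with ⟨t, ht⟩
  by_contra hb
  rw [Bool.not_eq_false, PySem.Chars.startswith_iff] at hb
  rcases hb with ⟨u, hu⟩
  rw [← ht] at hu
  rw [show "prove".toList = ['p','r','o','v','e'] from rfl,
    show "rw".toList = ['r','w'] from rfl] at hu
  simp at hu

theorem pv_extract_rewrites_eq (tc : String) :
    extract_rewrites tc
      = ((pvLines tc).filter (fun line => PySem.Str.startswith (PySem.Str.strip line) "rw")).map
          PySem.Str.strip := by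
  show (pvLines tc).foldl
      (fun rewrites line =>
        if PySem.Str.startswith (PySem.Str.strip line) "rw" = true
        then rewrites ++ [PySem.Str.strip line] else rewrites) [] = _
  rw [PySem.List.foldl_append_if (fun line => PySem.Str.startswith (PySem.Str.strip line) "rw")
    PySem.Str.strip]
  simp

theorem pv_parse_fst (tc : String) : (fstc_parse tc).1 = pvR tc := by
  have h1 : ∀ (lines : List String) (s : PySem.Set String) (o : Option String),
      ((lines.foldl (fun st line =>
          if PySem.Str.startswith (PySem.Str.strip line) "rw" = true then
            (PySem.Set.add st.1 (pvKey (PySem.Str.strip line)), st.2)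
          else if PySem.Str.startswith (PySem.Str.strip line) "prove" && st.2.isNone then
            (st.1, some (PySem.Str.strip line))
          else st) (s, o)).1)
        = lines.foldl (fun s line =>
            if PySem.Str.startswith (PySem.Str.strip line) "rw" = true
            then PySem.Set.add s (pvKey (PySem.Str.strip line)) else s) s := by
    intro lines
    induction lines with
    | nil => intro s o; rfl
    | cons x t ih =>
      intro s o
      simp only [List.foldl_cons]
      by_cases hrw : PySem.Str.startswith (PySem.Str.strip x) "rw" = true
      · rw [if_pos hrw, if_pos hrw]; exact ih _ _
      · rw [if_neg hrw, if_neg hrw]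
        by_cases hpv : (PySem.Str.startswith (PySem.Str.strip x) "prove" && o.isNone) = true
        · rw [if_pos hpv]; exact ih _ _
        · rw [if_neg hpv]; exact ih _ _
  show ((pvLines tc).foldl _ (PySem.Set.empty, none)).1 = _
  rw [h1, pv_foldl_if_add (fun line => PySem.Str.startswith (PySem.Str.strip line) "rw")
      (fun line => pvKey (PySem.Str.strip line)) PySem.Set.add]
  rw [pvR, pv_extract_rewrites_eq, PySem.Set.ofList_eq_foldl, List.map_map]
  rfl

theorem pv_parse_snd (tc : String) : (fstc_parse tc).2 = extract_prove_statement tc := by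
  have h2 : ∀ (lines : List String) (s : PySem.Set String) (o : Option String),
      ((lines.foldl (fun st line =>
          if PySem.Str.startswith (PySem.Str.strip line) "rw" = true then
            (PySem.Set.add st.1 (pvKey (PySem.Str.strip line)), st.2)
          else if PySem.Str.startswith (PySem.Str.strip line) "prove" && st.2.isNone then
            (st.1, some (PySem.Str.strip line))
          else st) (s, o)).2)
        = o.or (eps_go lines) := by
    intro lines
    induction lines with
    | nil => intro s o; cases o <;> rfl
    | cons x t ih =>
      intro s o
      simp only [List.foldl_cons]
      by_cases hrw : PySem.Str.startswith (PySem.Str.strip x) "rw" = true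
      · have hnp := pv_sw_rw_not_prove _ hrw
        rw [if_pos hrw, ih]
        simp only [eps_go, hnp, Bool.false_eq_true, if_false]
      · rw [if_neg hrw]
        by_cases hpv : PySem.Str.startswith (PySem.Str.strip x) "prove" = true
        · cases o with
          | none =>
            rw [if_pos (by rw [hpv]; rfl), ih]
            simp only [eps_go, hpv, Option.some_or, Option.none_or, if_true]
          | some v =>
            rw [if_neg (by simp only [Option.isNone_some, Bool.and_false, Bool.false_eq_true,
              not_false_eq_true]), ih]
            simp only [Option.some_or]
        · rw [if_neg (by simp only [Bool.and_eq_true, hpv, false_and, not_false_eq_true,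
            Bool.false_eq_true]), ih]
          have hnp : PySem.Str.startswith (PySem.Str.strip x) "prove" = false := by
            simpa using hpv
          simp only [eps_go, hnp, Bool.false_eq_true, if_false]
  show ((pvLines tc).foldl _ (PySem.Set.empty, none)).2 = _
  rw [h2]
  simp [extract_prove_statement]

-- ---------- B's inverted index and counts ----------
theorem pv_countP_flat (r : String) (j : Int) :
    ∀ (RS : List (PySem.Set String)) (s : Int),
      (((PySem.List.enumerate RS s).flatMap (fun p => p.2.map (fun x => (x, p.1)))).countP
          (fun q => q.2 == j && q.1 == r))
        = if s ≤ j ∧ j < s + RS.length then (RS.getD (j - s).toNat []).count r else 0 := by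
  intro RS
  induction RS with
  | nil =>
    intro s
    simp only [pv_enum_nil, List.flatMap_nil, List.countP_nil, List.length_nil]
    rw [if_neg (by omega)]
  | cons R t ih =>
    intro s
    rw [pv_enum_cons]
    simp only [List.flatMap_cons, List.countP_append, List.countP_map]
    rw [ih (s + 1)]
    by_cases hsj : s = j
    · subst hsj
      rw [if_neg (by omega), if_pos (by simp only [List.length_cons]; push_cast; omega)]
      have h0 : (s - s).toNat = 0 := by omega
      have hc : ((fun q : String × Int => q.2 == s && q.1 == r) ∘ fun x => (x, s))
          = (· == r) := by
        funext x; simp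
      rw [hc]
      simp only [h0, List.getD_cons_zero, Nat.add_zero, List.count]
    · have hz : ((fun q : String × Int => q.2 == j && q.1 == r) ∘ fun x => (x, s))
          = (fun _ => false) := by
        funext x; simp; intro h; omega
      rw [hz, List.countP_false]
      by_cases hj : s + 1 ≤ j ∧ j < s + 1 + t.length
      · rw [if_pos hj, if_pos (by simp only [List.length_cons]; push_cast at hj ⊢; omega)]
        have h1 : (j - s).toNat = (j - (s + 1)).toNat + 1 := by omega
        simp [h1]
      · rw [if_neg hj, if_neg (by simp only [List.length_cons]; push_cast at hj ⊢; omega)]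
        simp [Function.const]

theorem pv_counts_getD (idx : String → List Int) :
    ∀ (Lr : List String) (c : PySem.Dict Int Int) (j : Int),
      (Lr.foldl (fun c r => (idx r).foldl (fun c j => c.insert j (c.getD j 0 + 1)) c) c).getD j 0
        = c.getD j 0 + (Lr.map (fun r => (((idx r).count j : Int)))).sum := by
  intro Lr
  induction Lr with
  | nil => intro c j; simp
  | cons r t ih =>
    intro c j
    simp only [List.foldl_cons, List.map_cons, List.sum_cons]
    rw [ih, PySem.Dict.getD_foldl_insert_add_one]
    ring

theorem pv_sum_count_eq_interlen (Ri Rj : PySem.Set String) (hjn : Rj.Nodup) :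
    (Ri.map (fun r => ((Rj.count r : Int)))).sum = PySem.Set.len (PySem.Set.inter Ri Rj) := by
  have hc : (Ri.map (fun r => ((Rj.count r : Int))))
      = Ri.map (fun r => if Rj.contains r then (1 : Int) else 0) := by
    apply List.map_congr_left
    intro r _
    by_cases hm : r ∈ Rj
    · rw [if_pos (by simpa [PySem.Set.contains] using hm)]
      rw [List.count_eq_one_of_mem hjn hm]
      rfl
    · rw [if_neg (by simpa [PySem.Set.contains] using hm)]
      rw [List.count_eq_zero_of_not_mem hm]
      rfl
  rw [hc, PySem.List.sum_map_ite_one_zero (fun r => PySem.Set.contains Rj r) Ri]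
  rw [PySem.Set.len, PySem.Set.inter, List.countP_eq_length_filter]

-- ---------- loop-shape helpers ----------
theorem pv_foldl_ite_ite {α β : Type} (P Q : α → Prop) [DecidablePred P] [DecidablePred Q]
    (f : α → β) :
    ∀ (l : List α) (acc : List β),
      l.foldl (fun acc x => if P x then (if Q x then acc ++ [f x] else acc) else acc) acc
        = acc ++ (l.filter (fun x => decide (P x) && decide (Q x))).map f := by
  intro l
  induction l with
  | nil => intro acc; simp
  | cons x t ih =>
    intro acc
    simp only [List.foldl_cons, List.filter_cons]
    by_cases hP : P x
    · by_cases hQ : Q x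
      · rw [if_pos hP, if_pos hQ, ih]
        simp [hP, hQ]
      · rw [if_pos hP, if_neg hQ, ih]
        simp [hP, hQ]
    · rw [if_neg hP, ih]
      simp [hP]

theorem pv_filter_map_fst {α β : Type} (l : List (Int × α)) (pr : Int → Bool) (f : Int → β) :
    (l.filter (fun q => pr q.1)).map (fun q => f q.1)
      = ((l.map Prod.fst).filter pr).map f := by
  rw [List.filter_map, List.map_map]
  rfl

-- ---------- A's dicts, looked up ----------
theorem pv_TR_getD (tcs : List String) (j : Int) :
    ((PySem.List.enumerate tcs 0).foldl
        (fun d p => d.insert p.1 (PySem.Set.ofList ((extract_rewrites p.2).map pvKey)))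
        PySem.Dict.empty).getD j PySem.Set.empty
      = if 0 ≤ j ∧ j < tcs.length then pvR (tcs.getD j.toNat "") else PySem.Set.empty := by
  rw [pv_getD_enumInsert (fun tc => PySem.Set.ofList ((extract_rewrites tc).map pvKey))
    PySem.Set.empty tcs 0]
  simp only [zero_add, Int.sub_zero]
  rfl

theorem pv_PS_getD (tcs : List String) (j : Int) :
    ((PySem.List.enumerate tcs 0).foldl
        (fun d p => d.insert p.1 (extract_prove_statement p.2))
        PySem.Dict.empty).getD j none
      = if 0 ≤ j ∧ j < tcs.length then extract_prove_statement (tcs.getD j.toNat "") else none := by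
  rw [pv_getD_enumInsert extract_prove_statement none tcs 0]
  simp only [zero_add, Int.sub_zero]
  rfl

-- ---------- B's index, looked up and counted ----------
theorem pv_index_getD (RS : List (PySem.Set String)) (r : String) :
    ((PySem.List.enumerate RS 0).foldl
        (fun d p => p.2.foldl (fun d x => d.modify x [] (· ++ [p.1])) d)
        PySem.Dict.empty).getD r []
      = (((PySem.List.enumerate RS 0).flatMap (fun p => p.2.map (fun x => (x, p.1)))).filter
          (fun q => q.1 == r)).map (·.2) := by
  have h1 : ∀ (d : PySem.Dict String (List Int)) (p : Int × PySem.Set String),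
      p.2.foldl (fun d x => d.modify x [] (· ++ [p.1])) d
        = (p.2.map (fun x => (x, p.1))).foldl (fun d q => d.modify q.1 [] (· ++ [q.2])) d := by
    intro d p
    rw [List.foldl_map]
  simp only [h1]
  rw [pv_foldl_foldl_flatMap]
  rw [PySem.Dict.getD_foldl_modify_append]
  rfl

theorem pv_index_count (RS : List (PySem.Set String)) (r : String) (j : Int) :
    ((((PySem.List.enumerate RS 0).flatMap (fun p => p.2.map (fun x => (x, p.1)))).filter
        (fun q => q.1 == r)).map (·.2)).count j
      = if 0 ≤ j ∧ j < RS.length then (RS.getD j.toNat []).count r else 0 := by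
  rw [List.count, List.countP_map, List.countP_filter]
  have h := pv_countP_flat r j RS 0
  simp only [zero_add, Int.sub_zero] at h
  rw [← h]
  rfl

theorem pv_main (tcs : List String) :
    find_similar_test_cases tcs = find_similar_test_cases_alt tcs := by
  have hA := PySem.List.foldl_prod_mk
    (fun (d : PySem.Dict Int (PySem.Set String)) (p : Int × String) =>
      d.insert p.1 (PySem.Set.ofList (List.map pvKey (extract_rewrites p.2))))
    (fun (d : PySem.Dict Int (Option String)) (p : Int × String) =>
      d.insert p.1 (extract_prove_statement p.2))
    (PySem.List.enumerate tcs) PySem.Dict.empty PySem.Dict.empty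
  have hB := PySem.List.foldl_prod_mk
    (fun (l : List (PySem.Set String)) (tc : String) => l ++ [(fstc_parse tc).1])
    (fun (l : List (Option String)) (tc : String) => l ++ [(fstc_parse tc).2])
    tcs [] []
  have hRS : tcs.map (fun tc => (fstc_parse tc).1) = tcs.map pvR :=
    List.map_congr_left (fun tc _ => pv_parse_fst tc)
  have hPS : tcs.map (fun tc => (fstc_parse tc).2) = tcs.map extract_prove_statement :=
    List.map_congr_left (fun tc _ => pv_parse_snd tc)
  simp only [find_similar_test_cases, find_similar_test_cases_alt]
  rw [hA, hB]
  simp only [PySem.List.foldl_append_singleton_eq_map, List.nil_append]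
  rw [hRS, hPS]
  set TR := List.foldl
    (fun (d : PySem.Dict Int (PySem.Set String)) (q : Int × String) =>
      d.insert q.1 (PySem.Set.ofList (List.map pvKey (extract_rewrites q.2))))
    PySem.Dict.empty (PySem.List.enumerate tcs) with hTRdef
  set PS := List.foldl
    (fun (d : PySem.Dict Int (Option String)) (q : Int × String) =>
      d.insert q.1 (extract_prove_statement q.2))
    PySem.Dict.empty (PySem.List.enumerate tcs) with hPSdef
  set IDX := List.foldl
    (fun (d : PySem.Dict String (List Int)) (q : Int × PySem.Set String) =>
      List.foldl (fun d r => d.modify r [] fun x => x ++ [q.1]) d q.2)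
    PySem.Dict.empty (PySem.List.enumerate (tcs.map pvR)) with hIDXdef
  apply List.map_congr_left
  intro p hp
  obtain ⟨h0, h1, -⟩ := pv_mem_enum tcs 0 p hp
  rw [zero_add] at h1
  congr 1
  rw [pv_foldl_ite_ite
      (fun q : Int × String => p.1 ≠ q.1)
      (fun q : Int × String =>
        2 ≤ ((TR.getD p.1 PySem.Set.empty).inter (TR.getD q.1 PySem.Set.empty)).len)
      (fun q : Int × String => PS.getD q.1 none)
      (PySem.List.enumerate tcs) []]
  rw [List.nil_append]
  rw [pv_filter_map_fst (PySem.List.enumerate tcs)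
      (fun j => decide (p.1 ≠ j) &&
        decide (2 ≤ ((TR.getD p.1 PySem.Set.empty).inter (TR.getD j PySem.Set.empty)).len))
      (fun j => PS.getD j none)]
  rw [pv_enum_map_fst tcs 0, zero_add]
  simp only [PySem.List.len_eq]
  have hfil : List.filter
      (fun j => decide (p.1 ≠ j) &&
        decide (2 ≤ ((TR.getD p.1 PySem.Set.empty).inter (TR.getD j PySem.Set.empty)).len))
      (PySem.List.pyRange 0 (↑tcs.length) 1)
      = List.filter
        (fun j => decide (j ≠ p.1) &&
          decide (2 ≤ ((List.foldl
            (fun c r => List.foldl (fun c j => c.insert j (c.getD j 0 + 1)) c (IDX.getD r []))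
            PySem.Dict.empty
            (PySem.List.pyGetD (List.map pvR tcs) p.1 PySem.Set.empty) : PySem.Dict Int Int)).getD j 0))
        (PySem.List.pyRange 0 (↑tcs.length) 1) := by
    apply List.filter_congr
    intro j hj
    obtain ⟨hj0, hj1⟩ := PySem.List.mem_pyRange_one.1 hj
    -- A side
    rw [hTRdef, pv_TR_getD tcs p.1, pv_TR_getD tcs j,
      if_pos ⟨h0, h1⟩, if_pos ⟨hj0, hj1⟩]
    -- B side: counts
    have hc := pv_counts_getD (fun r => IDX.getD r [])
      (PySem.List.pyGetD (List.map pvR tcs) p.1 PySem.Set.empty) PySem.Dict.empty j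
    simp only [] at hc
    rw [hc]
    have hz : (PySem.Dict.empty : PySem.Dict Int Int).getD j 0 = 0 := rfl
    rw [hz, zero_add]
    rw [PySem.List.pyGetD_eq_getElem (List.map pvR tcs) PySem.Set.empty h0 (by simpa using h1), List.getElem_map]
    rw [hIDXdef]
    simp only [pv_index_getD, pv_index_count, List.length_map]
    have hcond : (0 ≤ j ∧ j < ((tcs.length : Int))) = True := eq_true ⟨hj0, hj1⟩
    simp only [hcond, if_true]
    rw [List.getD_eq_getElem (List.map pvR tcs) [] (by simpa using (by omega : j.toNat < tcs.length)),
      List.getElem_map]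
    rw [pv_sum_count_eq_interlen (pvR tcs[p.1.toNat]) (pvR tcs[j.toNat])
      (by rw [pvR]; exact PySem.Set.nodup_ofList _)]
    rw [List.getD_eq_getElem tcs "" (by omega : p.1.toNat < tcs.length),
      List.getD_eq_getElem tcs "" (by omega : j.toNat < tcs.length)]
    rw [show (decide (p.1 ≠ j)) = (decide (j ≠ p.1)) from decide_eq_decide.mpr ne_comm]
  rw [hfil]
  apply List.map_congr_left
  intro j hj
  obtain ⟨hj0, hj1⟩ := PySem.List.mem_pyRange_one.1 (List.mem_of_mem_filter hj)
  rw [hPSdef, pv_PS_getD tcs j, if_pos ⟨hj0, hj1⟩]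
  rw [PySem.List.pyGetD_eq_getElem (List.map extract_prove_statement tcs) none hj0 (by simpa using hj1), List.getElem_map]
  rw [List.getD_eq_getElem tcs "" (by omega)]


-- ===== VERDICT (by name: the statement is the Claim_ definition above) =====
theorem find_similar_test_cases_spec : Claim_equal_find_similar_test_cases := by
  intro test_cases _
  show find_similar_test_cases test_cases = find_similar_test_cases_alt test_cases
  exact pv_main test_cases
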